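-- pv_equiv track=rewrite | github.com/JMD18/practice_projects | card_game_project/cardGame.py | binaryShuffle2
-- ===== SOURCE A (Python) =====
-- def binaryShuffle2(deck):
--
--     newDeck = []
--     median = (int)(len(deck)/2)
--
--     for i in range(median):
--         newDeck.append(deck[i+median])
--         newDeck.append(deck[i])
--
--     deck = newDeck
--
--     return deck
-- ===== SOURCE B (Python) =====
-- def binaryShuffle2(deck):
--     median = len(deck) // 2
--     newDeck = [None] * (2 * median)
--     newDeck[0::2] = deck[median:2 * median]
--     newDeck[1::2] = deck[:median]
--     return newDeck
-- ===== Notes on version B (the rewrite author's own statement) =====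
-- stated objective: idiomatic
-- what changed: Replaces the alternating append loop with a preallocated list filled by two strided bulk slice assignments (second half into even positions, first half into odd positions).
import Mathlib
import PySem

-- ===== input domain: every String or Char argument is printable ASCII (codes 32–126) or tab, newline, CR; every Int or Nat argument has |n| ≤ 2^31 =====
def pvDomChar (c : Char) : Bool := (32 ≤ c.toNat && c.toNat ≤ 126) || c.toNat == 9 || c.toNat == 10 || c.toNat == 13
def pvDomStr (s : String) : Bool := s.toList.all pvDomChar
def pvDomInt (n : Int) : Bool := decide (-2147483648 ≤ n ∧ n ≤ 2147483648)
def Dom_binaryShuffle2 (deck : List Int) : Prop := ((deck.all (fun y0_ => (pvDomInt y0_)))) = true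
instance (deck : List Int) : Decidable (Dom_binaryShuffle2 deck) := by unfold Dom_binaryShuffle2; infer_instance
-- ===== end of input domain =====

-- B replaces A's alternating-append index loop by two bulk slices interleaved into
-- even/odd positions (Python: strided slice assignments); objective: more idiomatic.

-- ===== PORT A =====
-- for i in range(median): newDeck.append(deck[i+median]); newDeck.append(deck[i])
-- indices i+median and i are always in range, so pyGetD's default is never read
def binaryShuffle2 (deck : List Int) : List Int :=
  let median : Int := PySem.Int.truncdiv (deck.length : Int) 2   -- (int)(len(deck)/2)
  let newDeck : List Int :=
    (PySem.List.pyRange 0 median 1).foldl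
      (fun nd i =>
        (nd ++ [PySem.List.pyGetD deck (i + median) 0]) ++ [PySem.List.pyGetD deck i 0]) []
  newDeck

-- ===== PORT B =====
-- the two strided slice assignments newDeck[0::2] = …, newDeck[1::2] = … fill the
-- even and odd positions; as a list value that is the interleaving of the two slices
def pyInterleave (xs ys : List Int) : List Int :=
  (xs.zip ys).flatMap (fun p => [p.1, p.2])

def binaryShuffle2_alt (deck : List Int) : List Int :=
  let median : Int := PySem.Int.floordiv (deck.length : Int) 2   -- len(deck) // 2
  pyInterleave
    (PySem.List.slice deck (some median) (some (2 * median)))   -- deck[median:2*median]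
    (PySem.List.slice deck none (some median))                  -- deck[:median]

-- ===== PRECONDITION & SPEC =====
def Spec_binaryShuffle2 (deck : List Int) (out : List Int) : Prop := out = binaryShuffle2_alt deck
instance (deck : List Int) (out : List Int) : Decidable (Spec_binaryShuffle2 deck out) := by unfold Spec_binaryShuffle2; infer_instance

-- ===== CLAIM (what is proved, stated in full; the proofs are below) =====
def Claim_equal_binaryShuffle2 : Prop := ∀ (deck : List Int), Dom_binaryShuffle2 deck → Spec_binaryShuffle2 deck (binaryShuffle2 deck)

-- ===== LEMMAS AND PROOFS =====

theorem pyInterleave_snoc (xs ys : List Int) (x y : Int) (h : xs.length = ys.length) :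
    pyInterleave (xs ++ [x]) (ys ++ [y]) = pyInterleave xs ys ++ [x, y] := by
  simp [pyInterleave, List.zip_append h]

theorem truncdiv_len (n : Nat) : PySem.Int.truncdiv (n : Int) 2 = ((n / 2 : Nat) : Int) := by
  simp [PySem.Int.truncdiv]

-- A's loop after j iterations equals the interleaving of the first j elements of the two slices
theorem loop_eq (deck : List Int) (m : Nat) (hm : 2 * m ≤ deck.length) :
    ∀ (j : Nat), j ≤ m →
    (PySem.List.pyRange 0 (j : Int) 1).foldl
      (fun nd i =>
        (nd ++ [PySem.List.pyGetD deck (i + (m : Int)) 0]) ++ [PySem.List.pyGetD deck i 0]) []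
    = pyInterleave ((deck.drop m).take j) (deck.take j) := by
  intro j
  induction j with
  | zero => intro _; simp [pyInterleave]
  | succ j ih =>
    intro hj
    have hj' : j ≤ m := Nat.le_of_succ_le hj
    have hjm : j + m < deck.length := by omega
    have hjlt : j < deck.length := by omega
    have hcast : ((j + 1 : Nat) : Int) = (j : Int) + 1 := by push_cast; ring
    rw [hcast, PySem.List.pyRange_one_succ_right (by positivity), List.foldl_append]
    rw [ih hj']
    have hmj : m + j < deck.length := by omega
    have g1 : PySem.List.pyGetD deck ((j : Int) + (m : Int)) 0 = deck[m + j] := by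
      have : (j : Int) + (m : Int) = ((m + j : Nat) : Int) := by push_cast; ring
      rw [this, PySem.List.pyGetD_natCast, List.getD_eq_getElem deck 0 hmj]
    have g2 : PySem.List.pyGetD deck (j : Int) 0 = deck[j] := by
      rw [PySem.List.pyGetD_natCast, List.getD_eq_getElem deck 0 hjlt]
    have hdrop : (deck.drop m).take (j + 1) = (deck.drop m).take j ++ [deck[m + j]] := by
      rw [List.take_add_one]
      have : (deck.drop m)[j]? = some deck[m + j] := by
        rw [List.getElem?_drop, List.getElem?_eq_getElem hmj]
      simp [this]
    have htake : deck.take (j + 1) = deck.take j ++ [deck[j]] := by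
      rw [List.take_add_one, List.getElem?_eq_getElem hjlt]
      simp
    have hlen : ((deck.drop m).take j).length = (deck.take j).length := by
      simp [List.length_take, List.length_drop]
      omega
    rw [hdrop, htake, pyInterleave_snoc _ _ _ _ hlen]
    simp [g1, g2]

-- ===== VERDICT (by name: the statement is the Claim_ definition above) =====
theorem binaryShuffle2_spec : Claim_equal_binaryShuffle2 := by
  intro deck _
  unfold Spec_binaryShuffle2 binaryShuffle2 binaryShuffle2_alt
  have hm : 2 * (deck.length / 2) ≤ deck.length := by omega
  rw [truncdiv_len]
  have hfd : PySem.Int.floordiv ((deck.length : Nat) : Int) 2 = ((deck.length / 2 : Nat) : Int) := by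
    exact_mod_cast PySem.Int.floordiv_natCast deck.length 2
  rw [hfd]
  have key := loop_eq deck (deck.length / 2) hm (deck.length / 2) le_rfl
  rw [← PySem.List.slice_natCast_add deck (deck.length / 2) (deck.length / 2),
      ← PySem.List.slice_to_natCast deck (deck.length / 2)] at key
  have h2 : ((deck.length / 2 : Nat) : Int) + ((deck.length / 2 : Nat) : Int)
      = (2 : Int) * ((deck.length / 2 : Nat) : Int) := by ring
  rw [h2] at key
  exact key
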